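-- pv_equiv track=rewrite | github.com/max0ne/LeetGlue | encode-and-decode-strings.py | decode
-- ===== SOURCE A (Python) =====
-- def decode(s):
--     if not s:
--         return []
--     strs = []
--     curr = ''
--     idx = 0
--     while idx < len(s):
--         if s[idx] == '\\':
--             curr += s[idx : idx + 2].replace('\\\\', '\\').replace('\\-', '-')
--             idx += 1
--         elif s[idx] == '-':
--             strs.append(curr)
--             curr = ''
--         else:
--             curr += s[idx]
--         idx += 1
--     return strs
-- ===== SOURCE B (Python) =====
-- def decode(s):
--     # Two passes: split on '-', re-join the chunks whose separator was escaped
--     # (chunk ends in an odd run of backslashes), drop the unterminated remainder,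
--     # then unescape each token with two global replaces.
--     chunks = s.split('-')
--     tokens = []
--     buf = chunks[0]
--     for c in chunks[1:]:
--         if (len(buf) - len(buf.rstrip('\\'))) % 2 == 1:
--             buf = buf + '-' + c
--         else:
--             tokens.append(buf)
--             buf = c
--     return [t.replace('\\\\', '\\').replace('\\-', '-') for t in tokens]
-- ===== Notes on version B (the rewrite author's own statement) =====
-- stated objective: faster
-- what changed: replaces the char-by-char index loop with a two-pass pipeline: split the string at separator dashes, re-join chunks that end in an odd run of backslashes (escaped separators), drop the unterminated remainder, then unescape each token with two global replaces
import Mathlib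
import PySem

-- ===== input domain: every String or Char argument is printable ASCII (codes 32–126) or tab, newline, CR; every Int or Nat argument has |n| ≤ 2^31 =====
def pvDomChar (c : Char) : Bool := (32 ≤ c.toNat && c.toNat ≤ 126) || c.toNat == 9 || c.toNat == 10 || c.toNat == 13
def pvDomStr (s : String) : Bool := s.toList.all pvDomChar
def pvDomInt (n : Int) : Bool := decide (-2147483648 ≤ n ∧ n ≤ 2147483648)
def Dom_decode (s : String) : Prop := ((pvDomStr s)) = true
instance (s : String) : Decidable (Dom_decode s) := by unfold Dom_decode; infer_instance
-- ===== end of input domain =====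

-- B replaces A's char-by-char index loop by a two-pass pipeline (split at the
-- separator dashes, re-join chunks ending in an odd backslash run, unescape each
-- token with two global replaces); same return value, measured faster in CPython.

-- ===== PORT A =====
-- A's while loop: state (strs, curr, idx); Python strings ported as List Char,
-- the final list of strings rebuilt with String.ofList
def decodeLoopA (cs : List Char) (strs : List (List Char)) (curr : List Char)
    (idx : Nat) : List (List Char) :=
  if h : idx < cs.length then
    if cs[idx] = '\\' then
      decodeLoopA cs strs
        (curr ++ PySem.Chars.replace
          (PySem.Chars.replace (PySem.List.slice cs (some (idx : Int)) (some ((idx : Int) + 2)))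
            ['\\', '\\'] ['\\'])
          ['\\', '-'] ['-'])
        (idx + 2)
    else if cs[idx] = '-' then
      decodeLoopA cs (strs ++ [curr]) [] (idx + 1)
    else
      decodeLoopA cs strs (curr ++ [cs[idx]]) (idx + 1)
  else strs
termination_by cs.length - idx
decreasing_by all_goals omega

def decode (s : String) : List String :=
  if s.toList = [] then []
  else (decodeLoopA s.toList [] [] 0).map String.ofList

-- ===== PORT B =====
-- exact port of t.rstrip('\\') (strip backslashes from the right)
def rstripBS (t : List Char) : List Char := (t.reverse.dropWhile (· == '\\')).reverse
def escEnd (t : List Char) : Bool := (t.length - (rstripBS t).length) % 2 == 1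

def decode_alt (s : String) : List String :=
  let chunks := PySem.Chars.splitOn s.toList ['-']
  let p := chunks.tail.foldl
    (fun (st : List (List Char) × List Char) c =>
      if escEnd st.2 then (st.1, st.2 ++ '-' :: c) else (st.1 ++ [st.2], c))
    ([], chunks.headD [])
  p.1.map (fun t =>
    String.ofList (PySem.Chars.replace (PySem.Chars.replace t ['\\', '\\'] ['\\']) ['\\', '-'] ['-']))

-- ===== PRECONDITION & SPEC =====
-- (A is total: no Pre_)
def Spec_decode (s : String) (out : List String) : Prop := out = decode_alt s
instance (s : String) (out : List String) : Decidable (Spec_decode s out) := by unfold Spec_decode; infer_instance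

-- ===== CLAIM (what is proved, stated in full; the proofs are below) =====
def Claim_equal_decode : Prop := ∀ (s : String), Dom_decode s → Spec_decode s (decode s)

-- ===== LEMMAS AND PROOFS =====

def splitDash : List Char → List (List Char)
  | [] => [[]]
  | c :: r => if c = '-' then [] :: splitDash r else (splitDash r).modifyHead (c :: ·)

theorem splitDash_ne_nil (l : List Char) : splitDash l ≠ [] := by
  cases l with
  | nil => simp [splitDash]
  | cons c r =>
    simp only [splitDash]
    split
    · simp
    · cases h : splitDash r with
      | nil => exact absurd h (splitDash_ne_nil r)
      | cons a t => simp [List.modifyHead]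

theorem splitOn_go_eq (fuel : Nat) : ∀ (l cur : List Char) (acc : List (List Char)),
    l.length < fuel →
    PySem.Chars.splitOn.go ['-'] fuel l cur acc =
      acc.reverse ++ (splitDash l).modifyHead (cur.reverse ++ ·) := by
  induction fuel with
  | zero => intro l cur acc h; omega
  | succ f ih =>
    intro l cur acc h
    cases l with
    | nil => simp [PySem.Chars.splitOn.go, splitDash, List.modifyHead]
    | cons c rest =>
      simp only [PySem.Chars.splitOn.go]
      by_cases hc : c = '-'
      · subst hc
        have hp : List.isPrefixOf ['-'] ('-' :: rest) = true := by simp [List.isPrefixOf]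
        simp only [hp, if_pos, List.length_cons, List.drop_succ_cons, List.length_nil, List.drop_zero]
        rw [ih rest [] _ (by simp at h; omega)]
        simp only [splitDash, if_pos rfl]
        cases hs : splitDash rest with
        | nil => exact absurd hs (splitDash_ne_nil rest)
        | cons hd tl => simp [List.modifyHead]
      · have hp : List.isPrefixOf ['-'] (c :: rest) = false := by
          simp [List.isPrefixOf]; exact fun hh => absurd hh.symm hc
        simp only [hp, Bool.false_eq_true, if_false]
        rw [ih rest (c :: cur) acc (by simp at h ⊢; omega)]
        simp only [splitDash, if_neg hc]
        cases hs : splitDash rest with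
        | nil => exact absurd hs (splitDash_ne_nil rest)
        | cons hd tl => simp [List.modifyHead]

theorem splitOn_eq_splitDash (l : List Char) : PySem.Chars.splitOn l ['-'] = splitDash l := by
  have := splitOn_go_eq (l.length + 1) l [] [] (by omega)
  simp only [PySem.Chars.splitOn] at *
  rw [this]
  cases hs : splitDash l with
  | nil => exact absurd hs (splitDash_ne_nil l)
  | cons hd tl => simp [List.modifyHead]

def rep2 (a b : Char) (new : List Char) : List Char → List Char
  | [] => []
  | [c] => [c]
  | c :: d :: t => if c = a ∧ d = b then new ++ rep2 a b new t else c :: rep2 a b new (d :: t)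

theorem replace_go_eq (a b : Char) (new : List Char) (fuel : Nat) :
    ∀ (l acc : List Char), l.length ≤ fuel →
    PySem.Chars.replace.go [a, b] new fuel l acc = acc.reverse ++ rep2 a b new l := by
  induction fuel with
  | zero =>
    intro l acc h
    have : l = [] := by cases l <;> simp_all
    subst this
    simp [PySem.Chars.replace.go, rep2]
  | succ f ih =>
    intro l acc h
    cases l with
    | nil => simp [PySem.Chars.replace.go, rep2]
    | cons c t =>
      simp only [PySem.Chars.replace.go]
      by_cases hp : List.isPrefixOf [a, b] (c :: t) = true
      · obtain ⟨d, t', rfl⟩ : ∃ d t', t = d :: t' := by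
          cases t with
          | nil => simp [List.isPrefixOf] at hp
          | cons d t' => exact ⟨d, t', rfl⟩
        have hab : c = a ∧ d = b := by
          simp [List.isPrefixOf] at hp; exact ⟨hp.1.symm, hp.2.symm⟩
        simp only [hp, if_pos]
        rw [ih _ _ (by simp at h ⊢; omega)]
        simp only [rep2, if_pos hab]
        simp [List.length_cons]
      · simp only [hp, Bool.false_eq_true, if_false]
        rw [ih t (c :: acc) (by simp at h ⊢; omega)]
        cases t with
        | nil => simp [rep2]
        | cons d t' =>
          have hab : ¬(c = a ∧ d = b) := by
            intro ⟨h1, h2⟩; subst h1; subst h2; simp [List.isPrefixOf] at hp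
          simp [rep2, if_neg hab]

theorem replace_eq_rep2 (l new : List Char) (a b : Char) :
    PySem.Chars.replace l [a, b] new = rep2 a b new l := by
  simp only [PySem.Chars.replace, List.isEmpty]
  rw [replace_go_eq a b new l.length l [] (le_refl _)]
  simp

def run (t : List Char) : Nat := (t.reverse.takeWhile (· == '\\')).length

theorem escEnd_eq_run (t : List Char) : escEnd t = (run t % 2 == 1) := by
  have h : t.length = run t + (rstripBS t).length := by
    have := List.takeWhile_append_dropWhile (p := (· == '\\')) (l := t.reverse)
    have hl := congrArg List.length this
    simp only [List.length_append, List.length_reverse] at hl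
    simp [run, rstripBS]
    omega
  simp [escEnd, h]

theorem run_append_dash (x c : List Char) : run (x ++ '-' :: c) = run c := by
  simp only [run, List.reverse_append, List.reverse_cons]
  rw [show c.reverse ++ ['-'] ++ x.reverse = c.reverse ++ ('-' :: x.reverse) by simp]
  rw [List.takeWhile_append]
  split
  · next hfull =>
    simp only [List.takeWhile_cons]
    norm_num
    exact (by simpa using hfull : _ = _).symm
  · rfl

theorem escEnd_append_dash (x c : List Char) : escEnd (x ++ '-' :: c) = escEnd c := by
  rw [escEnd_eq_run, escEnd_eq_run, run_append_dash]

theorem escEnd_cons (c : Char) (hc : c ≠ '\\') (t : List Char) : escEnd (c :: t) = escEnd t := by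
  rw [escEnd_eq_run, escEnd_eq_run]
  have : run (c :: t) = run t := by
    simp only [run, List.reverse_cons]
    rw [List.takeWhile_append]
    split
    · next hfull =>
      simp only [List.takeWhile_cons]
      have : (c == '\\') = false := by simpa using hc
      simp [this]
      exact (by simpa using hfull : _ = _).symm
    · rfl
  rw [this]

theorem escEnd_cons_bs (c2 : Char) (t : List Char) : escEnd ('\\' :: c2 :: t) = escEnd t := by
  rw [escEnd_eq_run, escEnd_eq_run]
  simp only [run, List.reverse_cons]
  rw [show t.reverse ++ [c2] ++ ['\\'] = t.reverse ++ (c2 :: ['\\']) by simp]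
  rw [List.takeWhile_append]
  split
  · next hfull =>
    have hlen : (List.takeWhile (· == '\\') t.reverse).length = t.reverse.length := by
      simpa using hfull
    rw [hlen]
    by_cases hc2 : c2 = '\\'
    · subst hc2; simp [List.takeWhile_cons]
    · have : (c2 == '\\') = false := by simpa using hc2
      simp [List.takeWhile_cons, this]
  · rfl

def tokenize : List Char → List (List Char)
  | [] => [[]]
  | c :: r =>
    if c = '-' then [] :: tokenize r
    else if c = '\\' then
      match r with
      | [] => [['\\']]
      | c2 :: r2 => (tokenize r2).modifyHead (fun t => '\\' :: c2 :: t)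
    else (tokenize r).modifyHead (c :: ·)

theorem tok_dash (r : List Char) : tokenize ('-' :: r) = [] :: tokenize r := by
  rw [tokenize.eq_def]; simp

theorem tok_bs_nil : tokenize ['\\'] = [['\\']] := by simp [tokenize]

theorem tok_bs (c2 : Char) (r2 : List Char) :
    tokenize ('\\' :: c2 :: r2) = (tokenize r2).modifyHead (fun t => '\\' :: c2 :: t) := by
  simp [tokenize]

theorem tok_other (c : Char) (r : List Char) (h1 : c ≠ '-') (h2 : c ≠ '\\') :
    tokenize (c :: r) = (tokenize r).modifyHead (c :: ·) := by
  rw [tokenize.eq_def]; simp [h1, h2]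

theorem tokenize_ne_nil (l : List Char) : tokenize l ≠ [] := by
  induction l using tokenize.induct with
  | case1 => simp [tokenize]
  | case2 r ih => rw [tok_dash]; simp
  | case3 hc => rw [tok_bs_nil]; simp
  | case4 c2 r2 hc ih =>
    rw [tok_bs]
    cases h : tokenize r2 with
    | nil => exact absurd h ih
    | cons a t => simp [List.modifyHead]
  | case5 c r hc hc2 ih =>
    rw [tok_other c r hc hc2]
    cases h : tokenize r with
    | nil => exact absurd h ih
    | cons a t => simp [List.modifyHead]

def mrg : List (List Char) → List (List Char)
  | [] => []
  | [h] => [h]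
  | h :: h2 :: t =>
    if escEnd h then (mrg (h2 :: t)).modifyHead (fun u => h ++ '-' :: u)
    else h :: mrg (h2 :: t)

theorem mrg_ne_nil (h : List Char) (t : List (List Char)) : mrg (h :: t) ≠ [] := by
  cases t with
  | nil => simp [mrg]
  | cons h2 t' =>
    simp only [mrg]
    split
    · cases hm : mrg (h2 :: t') with
      | nil => exact absurd hm (mrg_ne_nil h2 t')
      | cons a t => simp [List.modifyHead]
    · simp

theorem mrg_merge (h c1 : List Char) (t : List (List Char)) :
    mrg ((h ++ '-' :: c1) :: t) = (mrg (c1 :: t)).modifyHead (fun u => h ++ '-' :: u) := by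
  cases t with
  | nil => simp [mrg, List.modifyHead]
  | cons c2 t2 =>
    simp only [mrg, escEnd_append_dash]
    by_cases he : escEnd c1 = true
    · simp only [he, if_pos]
      cases hm : mrg (c2 :: t2) with
      | nil => exact absurd hm (mrg_ne_nil c2 t2)
      | cons a t => simp [List.modifyHead]
    · simp only [he, Bool.false_eq_true, if_false]
      simp [List.modifyHead]

theorem fold_eq_mrg (t : List (List Char)) : ∀ (h : List Char) (toks : List (List Char)),
    (t.foldl
      (fun (st : List (List Char) × List Char) c =>
        if escEnd st.2 then (st.1, st.2 ++ '-' :: c) else (st.1 ++ [st.2], c))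
      (toks, h)).1 = toks ++ (mrg (h :: t)).dropLast := by
  induction t with
  | nil => intro h toks; simp [mrg]
  | cons c1 t' ih =>
    intro h toks
    simp only [List.foldl_cons]
    by_cases he : escEnd h = true
    · simp only [he, if_pos]
      rw [ih (h ++ '-' :: c1) toks, mrg_merge]
      simp only [mrg, if_pos he]
    · simp only [he, Bool.false_eq_true, if_false]
      rw [ih c1 (toks ++ [h])]
      simp only [mrg]
      rw [if_neg he, List.dropLast_cons_of_ne_nil (mrg_ne_nil c1 t')]
      simp

theorem escEnd_nil' : escEnd [] = false := by decide
theorem escEnd_bs1 : escEnd ['\\'] = true := by decide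

theorem sd_dash (r : List Char) : splitDash ('-' :: r) = [] :: splitDash r := by
  simp [splitDash]

theorem sd_other (c : Char) (r : List Char) (h : c ≠ '-') :
    splitDash (c :: r) = (splitDash r).modifyHead (c :: ·) := by
  simp [splitDash, h]

theorem mrg_splitDash (cs : List Char) : mrg (splitDash cs) = tokenize cs := by
  induction cs using tokenize.induct with
  | case1 => simp [splitDash, mrg, tokenize]
  | case2 r ih =>
    rw [tok_dash, ← ih, sd_dash]
    cases hs : splitDash r with
    | nil => exact absurd hs (splitDash_ne_nil r)
    | cons h t => simp only [mrg, escEnd_nil', Bool.false_eq_true, if_false]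
  | case3 hc =>
    rw [tok_bs_nil]
    simp [splitDash, mrg, List.modifyHead]
  | case4 c2 r2 hc ih =>
    rw [tok_bs, ← ih]
    by_cases hc2 : c2 = '-'
    · subst hc2
      rw [sd_other '\\' ('-' :: r2) hc, sd_dash]
      cases hs : splitDash r2 with
      | nil => exact absurd hs (splitDash_ne_nil r2)
      | cons h2 t2 =>
        simp only [List.modifyHead, mrg, escEnd_bs1, if_pos]
        cases hm : mrg (h2 :: t2) with
        | nil => exact absurd hm (mrg_ne_nil h2 t2)
        | cons a t => simp [List.modifyHead]
    · rw [sd_other '\\' (c2 :: r2) hc, sd_other c2 r2 hc2]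
      cases hs : splitDash r2 with
      | nil => exact absurd hs (splitDash_ne_nil r2)
      | cons h2 t2 =>
        cases t2 with
        | nil => simp [List.modifyHead, mrg]
        | cons h3 t3 =>
          simp only [List.modifyHead, mrg, escEnd_cons_bs]
          by_cases he : escEnd h2 = true
          · simp only [he, if_pos]
            cases hm : mrg (h3 :: t3) with
            | nil => exact absurd hm (mrg_ne_nil h3 t3)
            | cons a t => simp
          · simp only [he, Bool.false_eq_true, if_false]
  | case5 c r hc hc2 ih =>
    rw [tok_other c r hc hc2, ← ih, sd_other c r hc]
    cases hs : splitDash r with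
    | nil => exact absurd hs (splitDash_ne_nil r)
    | cons h2 t2 =>
      cases t2 with
      | nil => simp [List.modifyHead, mrg]
      | cons h3 t3 =>
        simp only [List.modifyHead, mrg, escEnd_cons c hc2]
        by_cases he : escEnd h2 = true
        · simp only [he, if_pos]
          cases hm : mrg (h3 :: t3) with
          | nil => exact absurd hm (mrg_ne_nil h3 t3)
          | cons a t => simp
        · simp only [he, Bool.false_eq_true, if_false]

def unesc : List Char → List Char
  | [] => []
  | c :: r =>
    if c = '\\' then
      match r with
      | [] => ['\\']
      | c2 :: r2 =>
        (if c2 = '\\' then ['\\'] else if c2 = '-' then ['-'] else ['\\', c2]) ++ unesc r2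
    else c :: unesc r

def unesc1 : List Char → List Char
  | [] => []
  | c :: r =>
    if c = '\\' then
      match r with
      | [] => ['\\']
      | c2 :: r2 => (if c2 = '\\' then ['\\'] else ['\\', c2]) ++ unesc1 r2
    else c :: unesc1 r

def wfB : List Char → Bool
  | [] => true
  | c :: r =>
    if c = '-' then false
    else if c = '\\' then
      match r with
      | [] => true
      | _ :: r2 => wfB r2
    else wfB r

def scanA : List Char → List (List Char) → List Char → List (List Char)
  | [], strs, _ => strs
  | c :: rest, strs, curr =>
    if c = '\\' then
      match rest with
      | [] => strs
      | c2 :: r2 =>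
        scanA r2 strs
          (curr ++ (if c2 = '\\' then ['\\'] else if c2 = '-' then ['-'] else ['\\', c2]))
    else if c = '-' then scanA rest (strs ++ [curr]) []
    else scanA rest strs (curr ++ [c])

-- equation lemmas
theorem ue_bs_nil : unesc ['\\'] = ['\\'] := by simp [unesc]
theorem ue_bs (c2 : Char) (r2 : List Char) :
    unesc ('\\' :: c2 :: r2) =
      (if c2 = '\\' then ['\\'] else if c2 = '-' then ['-'] else ['\\', c2]) ++ unesc r2 := by
  simp [unesc]
theorem ue_other (c : Char) (r : List Char) (h : c ≠ '\\') : unesc (c :: r) = c :: unesc r := by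
  rw [unesc.eq_def]; simp [h]

theorem ue1_bs_nil : unesc1 ['\\'] = ['\\'] := by simp [unesc1]
theorem ue1_bs (c2 : Char) (r2 : List Char) :
    unesc1 ('\\' :: c2 :: r2) = (if c2 = '\\' then ['\\'] else ['\\', c2]) ++ unesc1 r2 := by
  simp [unesc1]
theorem ue1_other (c : Char) (r : List Char) (h : c ≠ '\\') : unesc1 (c :: r) = c :: unesc1 r := by
  rw [unesc1.eq_def]; simp [h]

theorem wf_dash (r : List Char) : wfB ('-' :: r) = false := by rw [wfB.eq_def]; simp
theorem wf_bs_nil : wfB ['\\'] = true := by simp [wfB]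
theorem wf_bs (c2 : Char) (r2 : List Char) : wfB ('\\' :: c2 :: r2) = wfB r2 := by simp [wfB]
theorem wf_other (c : Char) (r : List Char) (h1 : c ≠ '-') (h2 : c ≠ '\\') :
    wfB (c :: r) = wfB r := by
  rw [wfB.eq_def]; simp [h1, h2]

theorem sa_nil (strs : List (List Char)) (curr : List Char) : scanA [] strs curr = strs := rfl
theorem sa_bs_nil (strs : List (List Char)) (curr : List Char) :
    scanA ['\\'] strs curr = strs := by simp [scanA]
theorem sa_bs (c2 : Char) (r2 : List Char) (strs : List (List Char)) (curr : List Char) :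
    scanA ('\\' :: c2 :: r2) strs curr =
      scanA r2 strs
        (curr ++ (if c2 = '\\' then ['\\'] else if c2 = '-' then ['-'] else ['\\', c2])) := by
  simp [scanA]
theorem sa_dash (rest : List Char) (strs : List (List Char)) (curr : List Char) :
    scanA ('-' :: rest) strs curr = scanA rest (strs ++ [curr]) [] := by
  rw [scanA.eq_def]; simp
theorem sa_other (c : Char) (rest : List Char) (h1 : c ≠ '\\') (h2 : c ≠ '-')
    (strs : List (List Char)) (curr : List Char) :
    scanA (c :: rest) strs curr = scanA rest strs (curr ++ [c]) := by
  rw [scanA.eq_def]; simp [h1, h2]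

theorem modifyHead_nil_append (l : List (List Char)) :
    l.modifyHead (fun x => ([] : List Char) ++ x) = l := by
  cases l <;> simp

theorem scanA_eq_tokenize (cs : List Char) : ∀ (strs : List (List Char)) (curr : List Char),
    scanA cs strs curr =
      strs ++ (((tokenize cs).dropLast).map unesc).modifyHead (curr ++ ·) := by
  induction cs using tokenize.induct with
  | case1 => intro strs curr; simp [tokenize, sa_nil]
  | case2 r ih =>
    intro strs curr
    rw [sa_dash, ih, tok_dash,
      List.dropLast_cons_of_ne_nil (tokenize_ne_nil r), List.map_cons, modifyHead_nil_append]
    simp [List.modifyHead, unesc]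
  | case3 hc =>
    intro strs curr
    rw [sa_bs_nil, tok_bs_nil]
    simp
  | case4 c2 r2 hc ih =>
    intro strs curr
    rw [sa_bs, ih, tok_bs]
    cases ht : tokenize r2 with
    | nil => exact absurd ht (tokenize_ne_nil r2)
    | cons t1 ts' =>
      cases ts' with
      | nil => simp [List.modifyHead]
      | cons y ys =>
        simp only [List.modifyHead, List.dropLast_cons₂, List.map_cons, ue_bs]
        simp
  | case5 c r hc hc2 ih =>
    intro strs curr
    rw [sa_other c r hc2 hc, ih, tok_other c r hc hc2]
    cases ht : tokenize r with
    | nil => exact absurd ht (tokenize_ne_nil r)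
    | cons t1 ts' =>
      cases ts' with
      | nil => simp [List.modifyHead]
      | cons y ys =>
        simp only [List.modifyHead, List.dropLast_cons₂, List.map_cons, ue_other c t1 hc2]
        simp

theorem rep2_cons_ne (a b c : Char) (new r : List Char) (h : c ≠ a) :
    rep2 a b new (c :: r) = c :: rep2 a b new r := by
  cases r with
  | nil => simp [rep2]
  | cons d t => rw [rep2]; rw [if_neg (by intro ⟨h1, _⟩; exact h h1)]

-- the two-char slice, unescaped as A does, is the 'uu' unit
theorem slice_unit (cs : List Char) (idx : Nat) (h : idx < cs.length) :
    cs[idx] = '\\' →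
    PySem.Chars.replace
      (PySem.Chars.replace (PySem.List.slice cs (some (idx : Int)) (some ((idx : Int) + 2)))
        ['\\', '\\'] ['\\']) ['\\', '-'] ['-'] =
    (match cs.drop (idx + 1) with
     | [] => ['\\']
     | c2 :: _ => (if c2 = '\\' then ['\\'] else if c2 = '-' then ['-'] else ['\\', c2])) := by
  intro hbs
  have h2 : ((idx : Int) + 2) = ((idx : Int) + ((2 : Nat) : Int)) := by push_cast; ring
  rw [h2, PySem.List.slice_natCast_add]
  rw [List.drop_eq_getElem_cons h, hbs]
  rw [replace_eq_rep2, replace_eq_rep2]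
  cases hd : cs.drop (idx + 1) with
  | nil => simp [rep2]
  | cons c2 r2 =>
    simp only [List.take_succ_cons, List.take_cons, List.take_zero]
    by_cases hc2 : c2 = '\\'
    · subst hc2; decide
    · by_cases hc2d : c2 = '-'
      · subst hc2d; decide
      · have e1 : rep2 '\\' '\\' ['\\'] ['\\', c2] = ['\\', c2] := by
          rw [rep2, if_neg (fun hh => hc2 hh.2)]; simp [rep2]
        have e2 : rep2 '\\' '-' ['-'] ['\\', c2] = ['\\', c2] := by
          rw [rep2, if_neg (fun hh => hc2d hh.2)]; simp [rep2]
        rw [e1, e2]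
        simp [hc2, hc2d]

theorem loopA_eq_scanA (cs : List Char) (n : Nat) :
    ∀ (idx : Nat), cs.length - idx ≤ n → ∀ (strs : List (List Char)) (curr : List Char),
    decodeLoopA cs strs curr idx = scanA (cs.drop idx) strs curr := by
  induction n with
  | zero =>
    intro idx hn strs curr
    rw [decodeLoopA, dif_neg (by omega), List.drop_eq_nil_of_le (by omega), sa_nil]
  | succ n ih =>
    intro idx hn strs curr
    by_cases h : idx < cs.length
    · rw [decodeLoopA, dif_pos h, List.drop_eq_getElem_cons h]
      by_cases hbs : cs[idx] = '\\'
      · rw [if_pos hbs, hbs]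
        cases hd : cs.drop (idx + 1) with
        | nil =>
          have hlen : cs.length = idx + 1 := by
            have := congrArg List.length hd; simp at this; omega
          rw [sa_bs_nil, ih (idx + 2) (by omega) strs _,
            List.drop_eq_nil_of_le (by omega), sa_nil]
        | cons c2 r2 =>
          rw [sa_bs]
          have hdrop2 : cs.drop (idx + 2) = r2 := by
            have : cs.drop (idx + 2) = (cs.drop (idx + 1)).drop 1 := by
              rw [List.drop_drop]
            rw [this, hd]; rfl
          rw [ih (idx + 2) (by omega) strs _, hdrop2]
          have := slice_unit cs idx h hbs
          rw [hd] at this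
          rw [this]
      · by_cases hdash : cs[idx] = '-'
        · rw [if_neg hbs, if_pos hdash, hdash, sa_dash, ih (idx + 1) (by omega)]
        · rw [if_neg hbs, if_neg hdash, sa_other cs[idx] _ hbs hdash,
            ih (idx + 1) (by omega)]
    · rw [decodeLoopA, dif_neg h, List.drop_eq_nil_of_le (by omega), sa_nil]

theorem mem_modifyHead {α : Type} (f : α → α) (l : List α) (x : α) (hx : x ∈ l.modifyHead f) :
    (∃ a t, l = a :: t ∧ (x = f a ∨ x ∈ t)) ∨ l = [] := by
  cases l with
  | nil => right; rfl
  | cons a t =>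
    left
    refine ⟨a, t, rfl, ?_⟩
    simp [List.modifyHead] at hx
    exact hx

theorem tokenize_wf (cs : List Char) : ∀ t ∈ tokenize cs, wfB t = true := by
  induction cs using tokenize.induct with
  | case1 => intro t ht; simp [tokenize] at ht; simp [ht, wfB]
  | case2 r ih =>
    intro t ht
    rw [tok_dash, List.mem_cons] at ht
    rcases ht with h | h
    · simp [h, wfB]
    · exact ih t h
  | case3 hc =>
    intro t ht
    rw [tok_bs_nil] at ht
    simp at ht
    simp [ht, wf_bs_nil]
  | case4 c2 r2 hc ih =>
    intro t ht
    rw [tok_bs] at ht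
    rcases mem_modifyHead _ _ _ ht with ⟨a, t', heq, h | h⟩ | hnil
    · subst h
      rw [wf_bs]
      exact ih a (by rw [heq]; exact List.mem_cons_self)
    · exact ih t (by rw [heq]; exact List.mem_cons_of_mem _ h)
    · exact absurd hnil (tokenize_ne_nil r2)
  | case5 c r hc hc2 ih =>
    intro t ht
    rw [tok_other c r hc hc2] at ht
    rcases mem_modifyHead _ _ _ ht with ⟨a, t', heq, h | h⟩ | hnil
    · subst h
      rw [wf_other c a hc hc2]
      exact ih a (by rw [heq]; exact List.mem_cons_self)
    · exact ih t (by rw [heq]; exact List.mem_cons_of_mem _ h)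
    · exact absurd hnil (tokenize_ne_nil r)

theorem rep2_bs_bs (t : List Char) : wfB t = true → rep2 '\\' '\\' ['\\'] t = unesc1 t := by
  induction t using wfB.induct with
  | case1 => intro _; simp [rep2, unesc1]
  | case2 r2 => rw [wf_dash]; intro h; exact absurd h (by simp)
  | case3 hc => intro _; simp [rep2, ue1_bs_nil]
  | case4 c2 r2 hc ih =>
    rw [wf_bs]
    intro hw
    rw [ue1_bs]
    by_cases hc2 : c2 = '\\'
    · subst hc2
      rw [rep2, if_pos ⟨rfl, rfl⟩, ih hw]
      simp
    · rw [rep2, if_neg (fun hh => hc2 hh.2), rep2_cons_ne _ _ _ _ _ hc2, ih hw]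
      simp [hc2]
  | case5 c r2 hc hc2 ih =>
    rw [wf_other c r2 hc hc2]
    intro hw
    rw [rep2_cons_ne _ _ _ _ _ hc2, ue1_other c r2 hc2, ih hw]

theorem unesc1_head (t : List Char) (hw : wfB t = true) : ∀ (d : Char) (t' : List Char),
    unesc1 t = d :: t' → d ≠ '-' := by
  intro d t' heq hd
  subst hd
  cases t with
  | nil => simp [unesc1] at heq
  | cons c r =>
    by_cases hcd : c = '-'
    · subst hcd; rw [wf_dash] at hw; exact absurd hw (by simp)
    · by_cases hcb : c = '\\'
      · subst hcb
        cases r with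
        | nil =>
          rw [ue1_bs_nil] at heq
          injection heq with h1 _
          exact absurd h1 (by decide)
        | cons c2 r2 =>
          rw [ue1_bs] at heq
          by_cases hc2 : c2 = '\\'
          · rw [if_pos hc2] at heq
            injection heq with h1 _
            exact absurd h1 (by decide)
          · rw [if_neg hc2] at heq
            injection heq with h1 _
            exact absurd h1 (by decide)
      · rw [ue1_other c r hcb] at heq
        injection heq with h1 _
        exact hcd h1

theorem unesc1_nil_iff (t : List Char) : unesc1 t = [] ↔ t = [] := by
  constructor
  · intro h
    cases t with
    | nil => rfl
    | cons c r =>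
      by_cases hcb : c = '\\'
      · subst hcb
        cases r with
        | nil => rw [ue1_bs_nil] at h; simp at h
        | cons c2 r2 => rw [ue1_bs] at h; by_cases hc2 : c2 = '\\' <;> simp [hc2] at h
      · rw [ue1_other c r hcb] at h; simp at h
  · intro h; subst h; rfl

theorem rep2_bs_dash (t : List Char) : wfB t = true → rep2 '\\' '-' ['-'] (unesc1 t) = unesc t := by
  induction t using wfB.induct with
  | case1 => intro _; simp [unesc1, rep2, unesc]
  | case2 r2 => rw [wf_dash]; intro h; exact absurd h (by simp)
  | case3 hc => intro _; rw [ue1_bs_nil, ue_bs_nil]; simp [rep2]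
  | case4 c2 r2 hc ih =>
    rw [wf_bs]
    intro hw
    rw [ue1_bs, ue_bs]
    by_cases hc2 : c2 = '\\'
    · subst hc2
      rw [if_pos rfl, if_pos rfl]
      cases hu : unesc1 r2 with
      | nil =>
        have hr : r2 = [] := (unesc1_nil_iff r2).mp hu
        subst hr
        simp [rep2, unesc]
      | cons d t' =>
        have hd : d ≠ '-' := unesc1_head r2 hw d t' hu
        rw [show (['\\'] : List Char) ++ (d :: t') = '\\' :: d :: t' from rfl,
          rep2, if_neg (fun hh => hd hh.2), ← hu, ih hw]
        rfl
    · by_cases hc2d : c2 = '-'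
      · subst hc2d
        rw [if_neg hc2, if_neg hc2, if_pos rfl]
        rw [show (['\\', '-'] : List Char) ++ unesc1 r2 = '\\' :: '-' :: unesc1 r2 from rfl,
          rep2, if_pos ⟨rfl, rfl⟩, ih hw]
      · rw [if_neg hc2, if_neg hc2, if_neg hc2d]
        rw [show (['\\', c2] : List Char) ++ unesc1 r2 = '\\' :: c2 :: unesc1 r2 from rfl]
        cases hu : unesc1 r2 with
        | nil =>
          have hr : r2 = [] := (unesc1_nil_iff r2).mp hu
          subst hr
          rw [rep2, if_neg (fun hh => hc2d hh.2)]
          simp [rep2, unesc]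
        | cons d t' =>
          rw [rep2, if_neg (fun hh => hc2d hh.2), rep2_cons_ne _ _ _ _ _ hc2, ← hu, ih hw]
          rfl
  | case5 c r2 hc hc2 ih =>
    rw [wf_other c r2 hc hc2]
    intro hw
    rw [ue1_other c r2 hc2, ue_other c r2 hc2, rep2_cons_ne _ _ _ _ _ hc2, ih hw]

theorem decodeA_eq (s : String) :
    decode s = ((tokenize s.toList).dropLast.map unesc).map String.ofList := by
  unfold decode
  by_cases h : s.toList = []
  · rw [if_pos h, h]
    simp [tokenize]
  · rw [if_neg h, loopA_eq_scanA s.toList s.toList.length 0 (by omega), List.drop_zero,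
      scanA_eq_tokenize, modifyHead_nil_append]
    simp

theorem decodeB_eq (s : String) :
    decode_alt s = ((tokenize s.toList).dropLast).map
      (fun t => String.ofList (rep2 '\\' '-' ['-'] (rep2 '\\' '\\' ['\\'] t))) := by
  simp only [decode_alt, splitOn_eq_splitDash]
  cases hs : splitDash s.toList with
  | nil => exact absurd hs (splitDash_ne_nil s.toList)
  | cons h t =>
    simp only [List.headD_cons, List.tail_cons]
    rw [fold_eq_mrg, ← hs, mrg_splitDash]
    simp only [List.nil_append, replace_eq_rep2]

theorem decode_eq_alt (s : String) : decode s = decode_alt s := by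
  rw [decodeA_eq, decodeB_eq, List.map_map]
  apply List.map_congr_left
  intro t ht
  have hw : wfB t = true :=
    tokenize_wf s.toList t ((List.dropLast_sublist (tokenize s.toList)).subset ht)
  simp only [Function.comp]
  rw [rep2_bs_bs t hw, rep2_bs_dash t hw]

-- ===== VERDICT (by name: the statement is the Claim_ definition above) =====
theorem decode_spec : Claim_equal_decode := by
  intro s _
  unfold Spec_decode
  exact decode_eq_alt s
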